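-- pv_equiv track=rewrite | github.com/telliott99/Crypto | AES/code/old/utils.py | pchunks
-- ===== SOURCE A (Python) =====
-- def chunks(iterable, n):
--     rL = list()
--     while iterable:
--         rL.append(iterable[:n])
--         iterable = iterable[n:]
--     return rL
--
-- def pchunks(L, SZ=7, ONELINE=4):
--     pL = list()
--     cL = chunks(L, SZ)
--     for i, sL in enumerate(cL):
--         if i:
--             if i % ONELINE == 0:
--                 pL.append('\n')
--             else:
--                 pL.append(' ')
--         pL.append(''.join(sL))
--     return ''.join(pL)
-- ===== SOURCE B (Python) =====
-- def pchunks(L, SZ=7, ONELINE=4):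
--     strs = [''.join(L[j:j + SZ]) for j in range(0, len(L), SZ)]
--     lines = []
--     cur = []
--     for i, s in enumerate(strs):
--         if i and i % ONELINE == 0:
--             lines.append(' '.join(cur))
--             cur = []
--         cur.append(s)
--     if cur:
--         lines.append(' '.join(cur))
--     return '\n'.join(lines)
-- ===== Notes on version B (the rewrite author's own statement) =====
-- stated objective: alternative
-- what changed: A interleaves separator tokens (' '/'\n') with chunk strings in one flat pass joined by ''; B slices chunks by a range of start indices, groups chunk strings into lines and performs a hierarchical two-level join (' ' within lines, '\n' between lines).
-- outside the precondition, e.g. on pchunks([], 0, 4): A returns '', B raises ValueError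
import Mathlib
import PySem

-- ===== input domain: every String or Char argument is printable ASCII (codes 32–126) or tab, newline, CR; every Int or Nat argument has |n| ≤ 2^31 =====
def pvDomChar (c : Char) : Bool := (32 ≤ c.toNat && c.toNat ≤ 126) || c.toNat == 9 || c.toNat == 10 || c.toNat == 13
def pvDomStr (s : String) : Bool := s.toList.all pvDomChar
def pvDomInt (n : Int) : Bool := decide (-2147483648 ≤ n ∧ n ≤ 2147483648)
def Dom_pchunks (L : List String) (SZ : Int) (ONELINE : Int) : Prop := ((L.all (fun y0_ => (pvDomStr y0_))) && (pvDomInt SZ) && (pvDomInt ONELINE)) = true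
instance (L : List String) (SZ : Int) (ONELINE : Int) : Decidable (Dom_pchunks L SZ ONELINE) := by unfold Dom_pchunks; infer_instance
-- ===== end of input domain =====

-- B re-decomposes the output: A interleaves separator tokens with chunk strings in one flat pass;
-- B slices chunks by a range of start indices, groups them into lines and does a two-level join (' ' within a line, '\n' between lines).
-- Objective: alternative decomposition, same asymptotic cost; return values proved equal on Pre_.

-- ===== PORT A =====
-- while iterable: rL.append(iterable[:n]); iterable = iterable[n:]  (fuel = length + 1 bounds the loop; saturated whenever 1 ≤ n or the list is empty)
def chunksGoA (fuel : Nat) (iterable : List String) (n : Int) : List (List String) :=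
  match fuel with
  | 0 => []
  | fuel + 1 =>
      if iterable = [] then []
      else PySem.List.slice iterable none (some n) ::
           chunksGoA fuel (PySem.List.slice iterable (some n) none) n

def chunksA (iterable : List String) (n : Int) : List (List String) :=
  chunksGoA (iterable.length + 1) iterable n

def aStep (ONELINE : Int) (pL : List String) (p : Int × List String) : List String :=
  (if p.1 ≠ 0 then
     (if PySem.Int.mod p.1 ONELINE = 0 then pL ++ ["\n"] else pL ++ [" "])
   else pL) ++ [PySem.Str.join "" p.2]

def pchunks (L : List String) (SZ : Int) (ONELINE : Int) : String :=
  let cL := chunksA L SZ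
  let pL := (PySem.List.enumerate cL).foldl (aStep ONELINE) []
  PySem.Str.join "" pL

-- ===== PORT B =====
def bStep (ONELINE : Int) (st : List String × List String) (p : Int × String) : List String × List String :=
  let st' := if p.1 ≠ 0 ∧ PySem.Int.mod p.1 ONELINE = 0
             then (st.1 ++ [PySem.Str.join " " st.2], ([] : List String))
             else st
  (st'.1, st'.2 ++ [p.2])

def pchunks_alt (L : List String) (SZ : Int) (ONELINE : Int) : String :=
  let strs := (PySem.List.pyRange 0 (L.length : Int) SZ).map
      (fun j => PySem.Str.join "" (PySem.List.slice L (some j) (some (j + SZ))))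
  let st := (PySem.List.enumerate strs).foldl (bStep ONELINE) ([], [])
  let lines := if st.2 ≠ [] then st.1 ++ [PySem.Str.join " " st.2] else st.1
  PySem.Str.join "\n" lines

-- ===== PRECONDITION & SPEC =====
-- Pre_ excludes inputs on which Python A does not return (SZ ≤ 0 with a nonempty L makes A's while
-- loop run forever; ONELINE = 0 with at least two chunks raises ZeroDivisionError) and the single
-- corner L = [] with SZ = 0, where A returns '' but B's range(0, 0, 0) raises ValueError.
def Pre_pchunks (L : List String) (SZ : Int) (ONELINE : Int) : Prop :=
  ((L = [] ∧ SZ ≠ 0) ∨ 1 ≤ SZ) ∧ (ONELINE ≠ 0 ∨ L = [] ∨ (L.length : Int) ≤ SZ)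
instance (L : List String) (SZ : Int) (ONELINE : Int) : Decidable (Pre_pchunks L SZ ONELINE) := by
  unfold Pre_pchunks; infer_instance

def pvWitness_pchunks : List String × Int × Int := (["ab", "cd", "ef"], 2, 2)

def Spec_pchunks (L : List String) (SZ : Int) (ONELINE : Int) (out : String) : Prop := out = pchunks_alt L SZ ONELINE
instance (L : List String) (SZ : Int) (ONELINE : Int) (out : String) : Decidable (Spec_pchunks L SZ ONELINE out) := by unfold Spec_pchunks; infer_instance

-- ===== CLAIM (what is proved, stated in full; the proofs are below) =====
def Claim_equal_pchunks : Prop := ∀ (L : List String) (SZ : Int) (ONELINE : Int), Dom_pchunks L SZ ONELINE → Pre_pchunks L SZ ONELINE → Spec_pchunks L SZ ONELINE (pchunks L SZ ONELINE)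

-- ===== LEMMAS AND PROOFS =====

theorem joinNil_eq_flatten (l : List (List Char)) : PySem.Chars.join [] l = l.flatten := by
  induction l with
  | nil => simp [PySem.Chars.join_nil]
  | cons p rest ih =>
    cases rest with
    | nil => simp [PySem.Chars.join_singleton]
    | cons q r => simp [PySem.Chars.join_cons_cons] at ih ⊢; simpa using ih

theorem join_append_singleton (sep : List Char) (l : List (List Char)) (x : List Char) :
    PySem.Chars.join sep (l ++ [x]) =
      PySem.Chars.join sep l ++ (if l = [] then [] else sep) ++ x := by
  induction l with
  | nil => simp [PySem.Chars.join_singleton, PySem.Chars.join_nil]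
  | cons p rest ih =>
    cases rest with
    | nil => simp [PySem.Chars.join_singleton, PySem.Chars.join_cons_cons]
    | cons q r =>
      simp only [List.cons_append, PySem.Chars.join_cons_cons] at ih ⊢
      simp [ih]

theorem pyRange_pos_cons {s : Int} (hs : 0 < s) {a b : Int} (hab : a < b) :
    PySem.List.pyRange a b s = a :: PySem.List.pyRange (a + s) b s := by
  rw [PySem.List.pyRange_of_pos _ _ hs, PySem.List.pyRange_of_pos _ _ hs]
  have key : (b - a + s - 1) / s = (b - a - 1) / s + 1 := by
    rw [show b - a + s - 1 = (b - a - 1) + 1 * s by ring]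
    rw [Int.add_mul_ediv_right _ _ (by omega : s ≠ 0)]
  have hq : 0 ≤ (b - a - 1) / s := Int.ediv_nonneg (by omega) hs.le
  by_cases hc : a + s < b
  · have hcount : (if a < b then ((b - a + s - 1) / s).toNat else 0)
        = ((b - a - 1) / s).toNat + 1 := by
      rw [if_pos hab, key]; omega
    have hcount2 : (if a + s < b then ((b - (a + s) + s - 1) / s).toNat else 0)
        = ((b - a - 1) / s).toNat := by
      rw [if_pos hc]; congr 2; ring_nf
    rw [hcount, hcount2, List.range_succ_eq_map, List.map_cons, List.map_map]
    refine congrArg₂ List.cons (by simp) ?_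
    apply List.map_congr_left
    intro k _
    simp [Function.comp, Nat.succ_eq_add_one]
    ring
  · have hz : (b - a - 1) / s = 0 := Int.ediv_eq_zero_of_lt (by omega) (by omega)
    have hcount : (if a < b then ((b - a + s - 1) / s).toNat else 0) = 1 := by
      rw [if_pos hab, key, hz]; rfl
    have hcount2 : (if a + s < b then ((b - (a + s) + s - 1) / s).toNat else 0) = 0 := by
      rw [if_neg hc]
    rw [hcount, hcount2]
    simp

theorem pyRange_shift {s : Int} (hs : 0 < s) (a b c : Int) :
    PySem.List.pyRange (a + c) (b + c) s = (PySem.List.pyRange a b s).map (· + c) := by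
  rw [PySem.List.pyRange_of_pos _ _ hs, PySem.List.pyRange_of_pos _ _ hs]
  have h1 : b + c - (a + c) = b - a := by ring
  have h2 : (a + c < b + c) ↔ (a < b) := by omega
  rw [List.map_map]
  simp only [h1, h2]
  apply List.map_congr_left
  intro k _
  simp
  ring

theorem pyRange_pos_nil {s : Int} (hs : 0 < s) {a b : Int} (hab : b ≤ a) :
    PySem.List.pyRange a b s = [] := by
  rw [PySem.List.pyRange_of_pos _ _ hs, if_neg (by omega)]
  rfl

theorem chunksGoA_eq {SZ : Int} (hSZ : 1 ≤ SZ) :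
    ∀ (fuel : Nat) (xs : List String), xs.length < fuel →
      chunksGoA fuel xs SZ =
        (PySem.List.pyRange 0 (xs.length : Int) SZ).map
          (fun j => PySem.List.slice xs (some j) (some (j + SZ))) := by
  intro fuel
  induction fuel with
  | zero => intro xs h; omega
  | succ fuel ih =>
    intro xs h
    by_cases hnil : xs = []
    · subst hnil
      rw [chunksGoA, if_pos rfl]
      rw [show ((List.length ([] : List String) : Int)) = 0 by simp,
          pyRange_pos_nil (by omega : (0:Int) < SZ) (le_refl 0)]
      rfl
    · have hlen : 0 < xs.length := List.length_pos_iff.mpr hnil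
      rw [chunksGoA, if_neg hnil]
      have hdrop : PySem.List.slice xs (some SZ) none = xs.drop SZ.toNat :=
        PySem.List.slice_from xs (by omega)
      have hdl : (xs.drop SZ.toNat).length = xs.length - SZ.toNat := by simp
      have ih' := ih (xs.drop SZ.toNat) (by omega)
      have hblt : (0 : Int) < (xs.length : Int) := by exact_mod_cast hlen
      conv_rhs => rw [pyRange_pos_cons (by omega : (0:Int) < SZ) hblt, List.map_cons]
      congr 1
      · rw [show (0:Int) + SZ = SZ by ring, PySem.List.slice_zero_start]
      · rw [hdrop, ih', show (0:Int) + SZ = SZ by ring]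
        by_cases hcase : SZ ≤ (xs.length : Int)
        · have hcast : ((xs.drop SZ.toNat).length : Int) = (xs.length : Int) - SZ := by
            rw [hdl]; omega
          rw [hcast]
          have hsh := pyRange_shift (by omega : (0:Int) < SZ) 0 ((xs.length : Int) - SZ) SZ
          rw [show ((xs.length : Int) - SZ + SZ) = (xs.length : Int) by ring,
              show (0 : Int) + SZ = SZ by ring] at hsh
          rw [hsh, List.map_map]
          apply List.map_congr_left
          intro j hj
          have hj0 : 0 ≤ j := by
            have := (PySem.List.mem_pyRange_iff_of_pos (by omega : (0:Int) < SZ) j).mp hj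
            omega
          simp only [Function.comp_apply]
          rw [PySem.List.slice_toNat _ (by omega : (0:Int) ≤ j) (by omega : (0:Int) ≤ j + SZ),
              PySem.List.slice_toNat _ (by omega : (0:Int) ≤ j + SZ) (by omega : (0:Int) ≤ j + SZ + SZ),
              List.drop_drop]
          congr 1
          · omega
          · congr 1
            omega
        · have h1 : PySem.List.pyRange SZ (xs.length : Int) SZ = [] :=
            pyRange_pos_nil (by omega) (by omega)
          have h2 : ((xs.drop SZ.toNat).length : Int) ≤ 0 := by
            rw [hdl]; omega
          have h3 : PySem.List.pyRange 0 ((xs.drop SZ.toNat).length : Int) SZ = [] :=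
            pyRange_pos_nil (by omega) (by omega)
          rw [h1, h3]
          rfl

def catS (K : Int) (i : Int) : List String → List Char
  | [] => []
  | s :: rest =>
      (if i ≠ 0 then (if PySem.Int.mod i K = 0 then ['\n'] else [' ']) else [])
        ++ s.toList ++ catS K (i + 1) rest


theorem A_fold (K : Int) :
    ∀ (cL : List (List String)) (i : Int) (acc : List String),
      (((PySem.List.enumerate cL i).foldl (aStep K) acc).map String.toList).flatten
        = (acc.map String.toList).flatten ++ catS K i (cL.map (PySem.Str.join "")) := by
  intro cL
  induction cL with
  | nil => intro i acc; simp [PySem.List.enumerate_nil, catS]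
  | cons s rest ih =>
    intro i acc
    rw [PySem.List.enumerate_cons, List.map_cons, List.foldl_cons, ih, catS]
    by_cases h0 : i ≠ 0
    · by_cases hm : PySem.Int.mod i K = 0
      · simp [aStep, h0, hm]
      · simp [aStep, h0, hm]
    · simp [aStep, h0]

theorem B_fold (K : Int) :
    ∀ (cs : List String) (i : Int) (lines cur : List String), 1 ≤ i → cur ≠ [] →
      PySem.Chars.join ['\n']
        ((if ((PySem.List.enumerate cs i).foldl (bStep K) (lines, cur)).2 ≠ [] then
            ((PySem.List.enumerate cs i).foldl (bStep K) (lines, cur)).1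
              ++ [PySem.Str.join " " ((PySem.List.enumerate cs i).foldl (bStep K) (lines, cur)).2]
          else ((PySem.List.enumerate cs i).foldl (bStep K) (lines, cur)).1).map String.toList)
      = PySem.Chars.join ['\n'] (lines.map String.toList)
          ++ (if lines = [] then [] else ['\n'])
          ++ PySem.Chars.join [' '] (cur.map String.toList)
          ++ catS K i cs := by
  intro cs
  induction cs with
  | nil =>
    intro i lines cur hi hcur
    simp only [PySem.List.enumerate_nil, List.foldl_nil, catS]
    rw [if_pos hcur, List.map_append, List.map_cons, List.map_nil, join_append_singleton]
    simp [PySem.Str.toList_join]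
  | cons s rest ih =>
    intro i lines cur hi hcur
    rw [PySem.List.enumerate_cons, List.foldl_cons]
    by_cases hm : PySem.Int.mod i K = 0
    · have hstep : bStep K (lines, cur) (i, s)
          = (lines ++ [PySem.Str.join " " cur], [s]) := by
        simp [bStep, hm, show i ≠ 0 by omega]
      rw [hstep, ih (i+1) _ _ (by omega) (by simp)]
      rw [catS, if_pos (by omega : i ≠ 0), if_pos hm]
      rw [List.map_append, List.map_cons, List.map_nil, join_append_singleton]
      simp [PySem.Str.toList_join, PySem.Chars.join_singleton]
    · have hstep : bStep K (lines, cur) (i, s) = (lines, cur ++ [s]) := by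
        simp [bStep, hm]
      rw [hstep, ih (i+1) _ _ (by omega) (by simp)]
      rw [catS, if_pos (by omega : i ≠ 0), if_neg hm]
      rw [List.map_append, List.map_cons, List.map_nil, join_append_singleton]
      simp [hcur]

theorem pyRange_zero_zero (s : Int) : PySem.List.pyRange 0 0 s = [] := by
  unfold PySem.List.pyRange
  split_ifs <;> simp_all

theorem chunk_strings_eq {L : List String} {SZ : Int} (h1 : L = [] ∨ 1 ≤ SZ) :
    (chunksA L SZ).map (PySem.Str.join "") =
      (PySem.List.pyRange 0 (L.length : Int) SZ).map
        (fun j => PySem.Str.join "" (PySem.List.slice L (some j) (some (j + SZ)))) := by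
  rcases h1 with h1 | h1
  · subst h1
    rw [show ((List.length ([] : List String) : Int)) = 0 by simp, pyRange_zero_zero]
    rfl
  · rw [chunksA, chunksGoA_eq h1 (L.length + 1) L (by omega), List.map_map]
    rfl

theorem catS_eq_B (K : Int) (strs : List String) :
    PySem.Chars.join ['\n']
      ((if ((PySem.List.enumerate strs 0).foldl (bStep K) ([], [])).2 ≠ [] then
          ((PySem.List.enumerate strs 0).foldl (bStep K) ([], [])).1
            ++ [PySem.Str.join " " ((PySem.List.enumerate strs 0).foldl (bStep K) ([], [])).2]
        else ((PySem.List.enumerate strs 0).foldl (bStep K) ([], [])).1).map String.toList)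
    = catS K 0 strs := by
  cases strs with
  | nil => simp [PySem.List.enumerate_nil, PySem.Chars.join_nil, catS]
  | cons s rest =>
    rw [PySem.List.enumerate_cons, List.foldl_cons,
        show bStep K ([], []) (0, s) = ([], [s]) by simp [bStep],
        show (0 : Int) + 1 = 1 by norm_num,
        B_fold K rest 1 [] [s] (le_refl 1) (by simp)]
    simp [catS, PySem.Chars.join_nil, PySem.Chars.join_singleton]

-- ===== VERDICT (by name: the statement is the Claim_ definition above) =====
theorem pchunks_spec : Claim_equal_pchunks := by
  intro L SZ ONELINE _hdom hpre
  unfold Spec_pchunks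
  rw [← String.toList_inj]
  have hA : (pchunks L SZ ONELINE).toList
      = catS ONELINE 0 ((chunksA L SZ).map (PySem.Str.join "")) := by
    rw [pchunks, PySem.Str.toList_join,
        show ("" : String).toList = [] by rfl, joinNil_eq_flatten,
        A_fold ONELINE (chunksA L SZ) 0 []]
    simp
  have hB : (pchunks_alt L SZ ONELINE).toList
      = catS ONELINE 0
          ((PySem.List.pyRange 0 (L.length : Int) SZ).map
            (fun j => PySem.Str.join "" (PySem.List.slice L (some j) (some (j + SZ))))) := by
    simp only [pchunks_alt]
    rw [PySem.Str.toList_join, show ("\n" : String).toList = ['\n'] by rfl]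
    exact catS_eq_B ONELINE _
  rw [hA, hB, chunk_strings_eq (hpre.1.imp And.left id)]
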